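-- pv_equiv track=rewrite | github.com/PiusCarbon/PreferenceBuilder | elimination.py | calculate_group_stage_parameters
-- ===== SOURCE A (Python) =====
-- import math
--
-- def calculate_group_stage_parameters(participants, size):
--     a = 0
--     b = 0
--
--     while size>1:
--         x = math.floor(participants/size)
--         y = math.floor(participants/(size-1))
--         for i in range(0,x):
--             for j in range(0,y):
--                 if i*size+j*(size-1) == participants:
--                     a = i
--                     b = j
--                     return a, b, size
--         size -= 1
-- ===== SOURCE B (Python) =====
-- def calculate_group_stage_parameters(participants, size):
--     # Closed form per candidate size: any solution has i congruent to
--     # participants mod (size-1); the smallest such i is participants % (size-1),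
--     # adjusted once by size-1 if its j lands exactly on the excluded bound y.
--     while size > 1:
--         d = size - 1
--         x = participants // size
--         y = participants // d
--         i = participants % d
--         j = (participants - i * size) // d
--         if j == y:
--             i += d
--             j -= size
--         if i < x and 0 <= j < y:
--             return i, j, size
--         size -= 1
-- ===== Notes on version B (the rewrite author's own statement) =====
-- stated objective: faster
-- what changed: B eliminates both of A's nested scans: for each candidate size it computes the unique minimal i = participants % (size-1) by modular arithmetic (with one closed-form adjustment when j hits the excluded bound) and derives j by exact division, doing O(1) work per size.
import Mathlib
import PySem

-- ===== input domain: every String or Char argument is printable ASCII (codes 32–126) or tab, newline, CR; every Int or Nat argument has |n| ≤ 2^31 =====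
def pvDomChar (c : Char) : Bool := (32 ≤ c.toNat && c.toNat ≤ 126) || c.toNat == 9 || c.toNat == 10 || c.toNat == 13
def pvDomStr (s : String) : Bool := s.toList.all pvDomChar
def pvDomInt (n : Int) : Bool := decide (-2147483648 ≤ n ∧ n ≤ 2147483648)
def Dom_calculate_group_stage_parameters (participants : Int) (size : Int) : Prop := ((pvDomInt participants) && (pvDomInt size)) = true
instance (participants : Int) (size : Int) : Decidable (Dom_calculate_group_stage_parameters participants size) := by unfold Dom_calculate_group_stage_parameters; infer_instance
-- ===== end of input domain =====

-- B replaces A's nested scans over i and j by a closed-form modular-arithmetic candidate per size (asymptotically faster).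
-- Python note: on Dom (|int| ≤ 2^31) math.floor(participants/size) with size ≥ 2 equals floor division, which is how it is ported.

-- ===== PORT A =====
-- inner double loop 'for i in range(0,x): for j in range(0,y): if i*size+j*(size-1)==participants: return i,j'
def pvAInner (participants size x y : Int) : Option (Int × Int) :=
  (PySem.List.pyRange 0 x 1).findSome? (fun i =>
    ((PySem.List.pyRange 0 y 1).find? (fun j => i * size + j * (size - 1) == participants)).map
      (fun j => (i, j)))

def calculate_group_stage_parameters (participants : Int) (size : Int) : Option (List Int) :=
  if h : 1 < size then
    match pvAInner participants size (PySem.Int.floordiv participants size)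
        (PySem.Int.floordiv participants (size - 1)) with
    | some ab => some [ab.1, ab.2, size]
    | none => calculate_group_stage_parameters participants (size - 1)
  else none
termination_by size.toNat
decreasing_by omega

-- ===== PORT B =====
-- closed form per size: i = participants % d, j by exact division, one adjustment if j = y
def calculate_group_stage_parameters_alt (participants : Int) (size : Int) : Option (List Int) :=
  if h : 1 < size then
    let d := size - 1
    let x := PySem.Int.floordiv participants size
    let y := PySem.Int.floordiv participants d
    let i0 := PySem.Int.mod participants d
    let j0 := PySem.Int.floordiv (participants - i0 * size) d
    let ij := if j0 = y then (i0 + d, j0 - size) else (i0, j0)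
    if ij.1 < x ∧ 0 ≤ ij.2 ∧ ij.2 < y then some [ij.1, ij.2, size]
    else calculate_group_stage_parameters_alt participants (size - 1)
  else none
termination_by size.toNat
decreasing_by omega

-- ===== PRECONDITION & SPEC =====
def Spec_calculate_group_stage_parameters (participants : Int) (size : Int) (out : Option (List Int)) : Prop := out = calculate_group_stage_parameters_alt participants size
instance (participants : Int) (size : Int) (out : Option (List Int)) : Decidable (Spec_calculate_group_stage_parameters participants size out) := by unfold Spec_calculate_group_stage_parameters; infer_instance

-- ===== CLAIM (what is proved, stated in full; the proofs are below) =====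
def Claim_equal_calculate_group_stage_parameters : Prop := ∀ (participants : Int) (size : Int), Dom_calculate_group_stage_parameters participants size → Spec_calculate_group_stage_parameters participants size (calculate_group_stage_parameters participants size)

-- ===== LEMMAS AND PROOFS =====

-- find? characterization (from previous attempt, known-good)
theorem pv_find?_unique {α : Type} (p : α → Bool) (l : List α) (a : α)
    (ha : a ∈ l) (hpa : p a = true) (hu : ∀ b, p b = true → b = a) :
    l.find? p = some a := by
  induction l with
  | nil => cases ha
  | cons c t ih =>
    by_cases hc : p c = true
    · have hca : c = a := hu c hc
      subst hca
      simp [List.find?, hc]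
    · have ha' : a ∈ t := by
        cases ha with
        | head => exact absurd hpa hc
        | tail _ h => exact h
      simp [List.find?, hc, ih ha']

theorem pv_findSome?_none {β : Type} (g : Int → Option β) (a x : Int)
    (h : ∀ b, a ≤ b → b < x → g b = none) :
    (PySem.List.pyRange a x 1).findSome? g = none := by
  rw [List.findSome?_eq_none_iff]
  intro b hb
  have hm := (PySem.List.mem_pyRange_one).mp hb
  exact h b hm.1 hm.2

theorem pv_findSome?_some {β : Type} (g : Int → Option β) (a x i : Int) (v : β)
    (hai : a ≤ i) (hix : i < x) (hg : g i = some v)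
    (hnone : ∀ b, a ≤ b → b < i → g b = none) :
    (PySem.List.pyRange a x 1).findSome? g = some v := by
  rw [PySem.List.pyRange_one_append a i x hai (by omega)]
  rw [List.findSome?_append, pv_findSome?_none g a i hnone]
  rw [PySem.List.pyRange_one_cons (by omega : i < x)]
  simp [List.findSome?, hg]

-- inner find over j reduced to a divisibility check (known-good from a previous build)
theorem pv_find_core (d r y : Int) (hd : 0 < d) :
    (PySem.List.pyRange 0 y 1).find? (fun j => j * d == r) =
      (if PySem.Int.mod r d = 0 ∧ 0 ≤ PySem.Int.floordiv r d ∧ PySem.Int.floordiv r d < y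
        then some (PySem.Int.floordiv r d) else none) := by
  have hrel := PySem.Int.floordiv_mul_add_mod r d
  by_cases h1 : PySem.Int.mod r d = 0
  · have hq : PySem.Int.floordiv r d * d = r := by rw [h1] at hrel; simpa using hrel
    by_cases h2 : 0 ≤ PySem.Int.floordiv r d ∧ PySem.Int.floordiv r d < y
    · rw [if_pos ⟨h1, h2⟩]
      apply pv_find?_unique
      · exact (PySem.List.mem_pyRange_one).mpr ⟨h2.1, h2.2⟩
      · simpa using hq
      · intro b hb
        have hb' : b * d = r := by simpa using hb
        exact mul_right_cancel₀ (ne_of_gt hd) (by rw [hb', hq])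
    · rw [if_neg (by tauto)]
      rw [List.find?_eq_none]
      intro b hb
      have hmem := (PySem.List.mem_pyRange_one).mp hb
      simp only [beq_iff_eq]
      intro hbd
      have : b = PySem.Int.floordiv r d :=
        mul_right_cancel₀ (ne_of_gt hd) (by rw [hbd, hq])
      exact h2 (by constructor <;> omega)
  · rw [if_neg (by tauto)]
    rw [List.find?_eq_none]
    intro b hb
    simp only [beq_iff_eq]
    intro hbd
    exact h1 ((PySem.Int.mod_eq_zero_iff_dvd r d).mpr ⟨b, by linarith [hbd]⟩)

-- the per-i result of A's inner double loop, as a function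
def pvG (p s y b : Int) : Option (Int × Int) :=
  if PySem.Int.mod (p - b * s) (s - 1) = 0 ∧ 0 ≤ PySem.Int.floordiv (p - b * s) (s - 1) ∧
      PySem.Int.floordiv (p - b * s) (s - 1) < y
  then some (b, PySem.Int.floordiv (p - b * s) (s - 1)) else none

theorem pvAInner_eq_G (p s x y : Int) (hs : 1 < s) :
    pvAInner p s x y = (PySem.List.pyRange 0 x 1).findSome? (pvG p s y) := by
  unfold pvAInner
  apply congrArg (fun f => List.findSome? f (PySem.List.pyRange 0 x 1))
  funext i
  have hpred : (fun j : Int => i * s + j * (s - 1) == p) =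
      (fun j : Int => j * (s - 1) == (p - i * s)) := by
    funext j
    rw [Bool.eq_iff_iff]
    simp only [beq_iff_eq]
    constructor <;> intro h <;> linarith
  rw [hpred, pv_find_core (s - 1) (p - i * s) y (by omega)]
  unfold pvG
  split_ifs <;> simp

theorem pv_step_eq (p s : Int) (hs : 1 < s) :
    pvAInner p s (PySem.Int.floordiv p s) (PySem.Int.floordiv p (s - 1)) =
      (let d := s - 1
       let x := PySem.Int.floordiv p s
       let y := PySem.Int.floordiv p d
       let i0 := PySem.Int.mod p d
       let j0 := PySem.Int.floordiv (p - i0 * s) d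
       let ij := if j0 = y then (i0 + d, j0 - s) else (i0, j0)
       if ij.1 < x ∧ 0 ≤ ij.2 ∧ ij.2 < y then some ij else none) := by
  have hd : (0:Int) < s - 1 := by omega
  set d := s - 1 with hdd
  set x := PySem.Int.floordiv p s with hxx
  have hmod : PySem.Int.mod p d = p % d := PySem.Int.mod_eq_emod_of_pos hd
  have hfd : ∀ a : Int, PySem.Int.floordiv a d = a / d := fun a =>
    PySem.Int.floordiv_eq_ediv_of_pos hd
  set i0 := p % d with hi0def
  set y := p / d with hydef
  have hi0 : 0 ≤ i0 := Int.emod_nonneg p (by omega)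
  have hi0d : i0 < d := Int.emod_lt_of_pos p hd
  have hyd : y * d + i0 = p := by rw [mul_comm]; exact Int.ediv_add_emod p d
  have key : p - i0 * s = (y - i0) * d := by
    have hs' : s = d + 1 := by omega
    rw [hs']; ring_nf; linarith [hyd]
  have hj0 : (p - i0 * s) / d = y - i0 := by
    rw [key, Int.mul_ediv_cancel _ (by omega)]
  -- value of A's per-i function on congruent indices i0 + k*d
  have hGval : ∀ k : Int, pvG p s y (i0 + k * d) =
      (if 0 ≤ (y - i0) - k * s ∧ (y - i0) - k * s < y
        then some (i0 + k * d, (y - i0) - k * s) else none) := by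
    intro k
    have hk2 : p - (i0 + k * d) * s = ((y - i0) - k * s) * d := by
      have hs' : s = d + 1 := by omega
      rw [hs']; ring_nf; linarith [hyd]
    unfold pvG
    rw [← hdd, hk2, hfd, Int.mul_ediv_cancel _ (by omega)]
    have hm0 : PySem.Int.mod (((y - i0) - k * s) * d) d = 0 :=
      (PySem.Int.mod_eq_zero_iff_dvd _ _).mpr (dvd_mul_left d _)
    rw [hm0]
    split_ifs with h1 h2 h2 <;> first | rfl | tauto
  -- A's per-i function vanishes on non-congruent indices
  have hGnone : ∀ b : Int, ¬ (d ∣ (p - b)) → pvG p s y b = none := by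
    intro b hnd
    unfold pvG
    rw [if_neg]
    rintro ⟨h1, -⟩
    apply hnd
    have hdvd : d ∣ (p - b * s) := (PySem.Int.mod_eq_zero_iff_dvd _ _).mp (by rw [hdd]; exact h1)
    have hre : p - b = (p - b * s) + b * d := by linear_combination (-b) * hdd
    rw [hre]
    exact dvd_add hdvd (dvd_mul_left d b)
  -- every nonneg congruent index is i0 + k*d with k ≥ 0
  have hcong : ∀ b : Int, 0 ≤ b → d ∣ (p - b) → ∃ k : Int, 0 ≤ k ∧ b = i0 + k * d := by
    intro b hb hdvd
    have h1 : d ∣ (p - i0) := ⟨y, by rw [mul_comm]; linarith [hyd]⟩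
    have h2 : d ∣ (b - i0) := by
      have : b - i0 = (p - i0) - (p - b) := by ring
      rw [this]; exact dvd_sub h1 hdvd
    obtain ⟨k, hk⟩ := h2
    have hk' : b - i0 = k * d := by rw [mul_comm] at hk; exact hk
    refine ⟨k, ?_, by linarith⟩
    by_contra hneg
    push_neg at hneg
    have hle : k * d ≤ (-1) * d := mul_le_mul_of_nonneg_right (by omega) (le_of_lt hd)
    have hneg1 : (-1 : Int) * d = -d := by ring
    linarith
  rw [pvAInner_eq_G p s _ _ hs]
  simp only [hmod, hfd, ← hydef, hj0]
  by_cases h0 : y - i0 = y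
  · -- i0 = 0: adjusted candidate (d, y - s)
    have hiz : i0 = 0 := by omega
    rw [if_pos h0]
    by_cases hC : d < x ∧ 0 ≤ y - s
    · rw [if_pos ⟨by omega, by omega, by omega⟩]
      have := pv_findSome?_some (pvG p s y) 0 x (i0 + d) (i0 + d, (y - i0) - s)
        (by omega) (by omega)
        (by
          have h1 := hGval 1
          simp only [one_mul] at h1
          rw [h1]
          exact if_pos ⟨by omega, by omega⟩)
        (fun b hb hbi => by
          by_cases hdvd : d ∣ (p - b)
          · obtain ⟨k, hk0, hkb⟩ := hcong b hb hdvd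
            have hk1 : k < 1 := by
              by_contra hge
              push_neg at hge
              have : 1 * d ≤ k * d := mul_le_mul_of_nonneg_right hge (le_of_lt hd)
              linarith
            have hk00 : k = 0 := by omega
            have hG0 := hGval 0
            simp only [zero_mul, add_zero, sub_zero] at hG0
            rw [hkb, hk00, zero_mul, add_zero, hG0]
            exact if_neg (by omega)
          · exact hGnone b hdvd)
      rw [this]
    · rw [if_neg (by omega)]
      apply pv_findSome?_none
      intro b hb hbx
      by_cases hdvd : d ∣ (p - b)
      · obtain ⟨k, hk0, hkb⟩ := hcong b hb hdvd
        by_cases hkz : k = 0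
        · have hG0 := hGval 0
          simp only [zero_mul, add_zero, sub_zero] at hG0
          rw [hkb, hkz, zero_mul, add_zero, hG0]
          exact if_neg (by omega)
        · have hk1 : 1 ≤ k := by omega
          have hkd : 1 * d ≤ k * d := mul_le_mul_of_nonneg_right hk1 (le_of_lt hd)
          have hks : 1 * s ≤ k * s := mul_le_mul_of_nonneg_right hk1 (by omega)
          rcases not_and_or.mp hC with hx | hy
          · exfalso; push_neg at hx; linarith
          · rw [hkb, hGval k]
            exact if_neg (by rintro ⟨hge, -⟩; push_neg at hy; linarith)
      · exact hGnone b hdvd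
  · -- i0 > 0: direct candidate (i0, y - i0)
    have hipos : 0 < i0 := by omega
    rw [if_neg h0]
    by_cases hC : i0 < x ∧ 0 ≤ y - i0
    · rw [if_pos ⟨by omega, by omega, by omega⟩]
      have := pv_findSome?_some (pvG p s y) 0 x i0 (i0, y - i0)
        (by omega) (by omega)
        (by
          have h00 := hGval 0
          simp only [zero_mul, add_zero, sub_zero] at h00
          rw [h00]
          exact if_pos ⟨by omega, by omega⟩)
        (fun b hb hbi => by
          by_cases hdvd : d ∣ (p - b)
          · obtain ⟨k, hk0, hkb⟩ := hcong b hb hdvd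
            have hkd : 0 ≤ k * d := mul_nonneg hk0 (le_of_lt hd)
            exfalso
            linarith
          · exact hGnone b hdvd)
      rw [this]
    · rw [if_neg (by omega)]
      apply pv_findSome?_none
      intro b hb hbx
      by_cases hdvd : d ∣ (p - b)
      · obtain ⟨k, hk0, hkb⟩ := hcong b hb hdvd
        have hkd : 0 ≤ k * d := mul_nonneg hk0 (le_of_lt hd)
        have hks : 0 ≤ k * s := mul_nonneg hk0 (by omega)
        rcases not_and_or.mp hC with hx | hy
        · exfalso; push_neg at hx; linarith
        · rw [hkb, hGval k]
          exact if_neg (by rintro ⟨hge, -⟩; push_neg at hy; linarith)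
      · exact hGnone b hdvd

theorem pv_loop_eq : ∀ (n : Nat) (p s : Int), s.toNat ≤ n →
    calculate_group_stage_parameters p s = calculate_group_stage_parameters_alt p s := by
  intro n
  induction n with
  | zero =>
    intro p s hs
    rw [calculate_group_stage_parameters, calculate_group_stage_parameters_alt]
    rw [dif_neg (by omega), dif_neg (by omega)]
  | succ n ih =>
    intro p s hs
    rw [calculate_group_stage_parameters, calculate_group_stage_parameters_alt]
    by_cases h : 1 < s
    · rw [dif_pos h, dif_pos h, pv_step_eq p s h]
      simp only []
      split_ifs <;> first | rfl | exact ih p (s - 1) (by omega)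
    · rw [dif_neg h, dif_neg h]

-- ===== VERDICT (by name: the statement is the Claim_ definition above) =====
theorem calculate_group_stage_parameters_spec : Claim_equal_calculate_group_stage_parameters := by
  intro p s _
  unfold Spec_calculate_group_stage_parameters
  exact pv_loop_eq s.toNat p s le_rfl
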